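-- pv_equiv track=rewrite | github.com/BroJun/PAT-Basic-Level-Practice | 1003.py | YES_or_NO
-- ===== SOURCE A (Python) =====
-- def YES_or_NO(word_str):
-- 	s_P = [];s_A = [];s_T = []
-- 	for i in range(len(word_str)):
-- 		if word_str[i] == 'P':s_P.append(i)
-- 		if word_str[i] == 'A':s_A.append(i)
-- 		if word_str[i] == 'T':s_T.append(i)
-- 	if not (len(s_P) == 1 and len(s_T) == 1 and len(s_A)+2 == len(word_str)):return 'NO'
-- 	if not s_P[0]+1 < s_T[0]:return 'NO'
-- 	if not s_P[0]*(s_T[0]-s_P[0]-1)==(len(word_str)-s_T[0]-1):return 'NO'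
-- 	return 'YES'
-- ===== SOURCE B (Python) =====
-- def YES_or_NO(word_str):
--     left, p, rest = word_str.partition('P')
--     mid, t, right = rest.partition('T')
--     if p and t and mid and all(c == 'A' for c in left + mid + right) \
--             and len(left) * len(mid) == len(right):
--         return 'YES'
--     return 'NO'
-- ===== Notes on version B (the rewrite author's own statement) =====
-- stated objective: simpler
-- what changed: Instead of scanning all indices into three index lists and testing arithmetic on them, B partitions the string at the first occurrence of each of the two marker letters and reasons about the three resulting segments: every segment character must be the filler letter A (which alone forces exactly one of each marker), the middle segment must be nonempty, and len(left)*len(mid) must equal len(right).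
import Mathlib
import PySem

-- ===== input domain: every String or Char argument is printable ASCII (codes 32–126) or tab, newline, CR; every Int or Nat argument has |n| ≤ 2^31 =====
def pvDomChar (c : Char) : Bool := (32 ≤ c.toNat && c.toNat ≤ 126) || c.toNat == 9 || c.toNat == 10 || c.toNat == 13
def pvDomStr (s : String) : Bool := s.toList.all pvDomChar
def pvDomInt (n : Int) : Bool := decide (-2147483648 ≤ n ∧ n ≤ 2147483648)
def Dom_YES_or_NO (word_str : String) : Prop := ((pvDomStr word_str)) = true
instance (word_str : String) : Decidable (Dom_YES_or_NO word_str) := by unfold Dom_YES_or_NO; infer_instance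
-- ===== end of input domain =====

-- B replaces A's index-list scan by partitioning the string at the first 'P' and the first 'T'
-- and reasoning about the three segments (a simpler decomposition; same O(n) cost).

-- ===== PORT A =====
-- the three appended index lists live in pairwise disjoint components of the fold state, so the
-- loop body is written componentwise (each component carries exactly its own Python 'if')
def YES_or_NO (word_str : String) : String :=
  let l := word_str.toList
  let st := (PySem.List.pyRange 0 (PySem.Str.len word_str) 1).foldl
    (fun (acc : List Int × List Int × List Int) i =>
      ( if PySem.List.pyGetD l i ' ' = 'P' then acc.1 ++ [i] else acc.1
      , if PySem.List.pyGetD l i ' ' = 'A' then acc.2.1 ++ [i] else acc.2.1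
      , if PySem.List.pyGetD l i ' ' = 'T' then acc.2.2 ++ [i] else acc.2.2 ))
    ([], [], [])
  if ¬ (st.1.length = 1 ∧ st.2.2.length = 1 ∧ st.2.1.length + 2 = l.length) then "NO"
  else if ¬ (PySem.List.pyGetD st.1 0 0 + 1 < PySem.List.pyGetD st.2.2 0 0) then "NO"
  else if ¬ (PySem.List.pyGetD st.1 0 0 * (PySem.List.pyGetD st.2.2 0 0 - PySem.List.pyGetD st.1 0 0 - 1)
             = (l.length : Int) - PySem.List.pyGetD st.2.2 0 0 - 1) then "NO"
  else "YES"


-- ===== PORT B =====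
-- str.partition(sep) for a single-char sep, by hand (PySem has no partition): returns
-- (before, sep-found?, after); exact — the Bool mirrors Python's middle component being
-- non-empty, which is all Source B uses it for (truthiness)
def pyPartitionChar (cs : List Char) (c : Char) : List Char × Bool × List Char :=
  match cs with
  | [] => ([], false, [])
  | x :: xs =>
    if x = c then ([], true, xs)
    else
      let r := pyPartitionChar xs c
      (x :: r.1, r.2.1, r.2.2)

def YES_or_NO_alt (word_str : String) : String :=
  let (left, p, rest) := pyPartitionChar word_str.toList 'P'
  let (mid, t, right) := pyPartitionChar rest 'T'
  if p = true ∧ t = true ∧ mid ≠ [] ∧ ((left ++ mid ++ right).all (· == 'A')) = true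
     ∧ left.length * mid.length = right.length
  then "YES" else "NO"


-- ===== PRECONDITION & SPEC =====
def Spec_YES_or_NO (word_str : String) (out : String) : Prop := out = YES_or_NO_alt word_str
instance (word_str : String) (out : String) : Decidable (Spec_YES_or_NO word_str out) := by unfold Spec_YES_or_NO; infer_instance

-- ===== CLAIM (what is proved, stated in full; the proofs are below) =====
def Claim_equal_YES_or_NO : Prop := ∀ (word_str : String), Dom_YES_or_NO word_str → Spec_YES_or_NO word_str (YES_or_NO word_str)

-- ===== LEMMAS AND PROOFS =====

def idxs (l : List Char) (c : Char) : List Nat :=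
  (List.range l.length).filter (fun i => decide (l.getD i ' ' = c))

lemma idxs_nil (c : Char) : idxs [] c = [] := rfl

lemma idxs_cons (x : Char) (xs : List Char) (c : Char) :
    idxs (x :: xs) c = (if x = c then [0] else []) ++ (idxs xs c).map Nat.succ := by
  simp only [idxs, List.length_cons, List.range_succ_eq_map, List.filter_cons, List.filter_map]
  by_cases h : x = c
  · simp only [List.getD_cons_zero, h, decide_true, if_true, List.cons_append, List.nil_append]
    congr 1
  · simp only [List.getD_cons_zero, h, decide_false, if_false, List.nil_append]
    congr 1

lemma length_idxs (l : List Char) (c : Char) : (idxs l c).length = l.count c := by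
  induction l with
  | nil => rfl
  | cons x xs ih =>
    rcases eq_or_ne x c with rfl | h
    · simp [idxs_cons, List.count_cons_self, ih]
    · simp [idxs_cons, List.count_cons_of_ne h, ih, h]

lemma idxs_append (u v : List Char) (c : Char) :
    idxs (u ++ v) c = idxs u c ++ (idxs v c).map (· + u.length) := by
  induction u with
  | nil => simp [idxs_nil]
  | cons x xs ih =>
    rw [List.cons_append, idxs_cons, idxs_cons, ih, List.map_append, List.map_map]
    simp only [List.length_cons, List.append_assoc]
    have hc : (Nat.succ ∘ fun x => x + xs.length) = fun x => x + (xs.length + 1) := by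
      funext i
      simp only [Function.comp_apply]
      omega
    rw [hc]

lemma count_PAT_le (l : List Char) :
    l.count 'P' + l.count 'A' + l.count 'T' ≤ l.length := by
  induction l with
  | nil => simp
  | cons x xs ih =>
    rcases eq_or_ne x 'P' with rfl | h1
    · simp [List.count_cons]; omega
    rcases eq_or_ne x 'A' with rfl | h2
    · simp [List.count_cons]; omega
    rcases eq_or_ne x 'T' with rfl | h3
    · simp [List.count_cons]; omega
    simp [List.count_cons_of_ne h1, List.count_cons_of_ne h2, List.count_cons_of_ne h3]
    omega

lemma all_PAT_of_count_eq {l : List Char}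
    (h : l.count 'P' + l.count 'A' + l.count 'T' = l.length) :
    ∀ x ∈ l, x = 'P' ∨ x = 'A' ∨ x = 'T' := by
  induction l with
  | nil => simp
  | cons y ys ih =>
    have hle := count_PAT_le ys
    intro x hx
    rcases List.mem_cons.mp hx with rfl | hx
    · by_contra hc
      push_neg at hc
      obtain ⟨h1, h2, h3⟩ := hc
      rw [List.count_cons_of_ne h1, List.count_cons_of_ne h2,
        List.count_cons_of_ne h3, List.length_cons] at h
      omega
    · refine ih ?_ x hx
      rcases eq_or_ne y 'P' with rfl | h1
      · simp [List.count_cons] at h; omega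
      rcases eq_or_ne y 'A' with rfl | h2
      · simp [List.count_cons] at h; omega
      rcases eq_or_ne y 'T' with rfl | h3
      · simp [List.count_cons] at h; omega
      rw [List.count_cons_of_ne h1, List.count_cons_of_ne h2,
        List.count_cons_of_ne h3, List.length_cons] at h
      omega

def intIdxs (l : List Char) (c : Char) : List Int := (idxs l c).map (fun i => (i : Int))

lemma YES_or_NO_eq (s : String) :
    YES_or_NO s =
      (if ¬ ((intIdxs s.toList 'P').length = 1 ∧ (intIdxs s.toList 'T').length = 1 ∧
             (intIdxs s.toList 'A').length + 2 = s.toList.length) then "NO"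
       else if ¬ (PySem.List.pyGetD (intIdxs s.toList 'P') 0 0 + 1 <
                  PySem.List.pyGetD (intIdxs s.toList 'T') 0 0) then "NO"
       else if ¬ (PySem.List.pyGetD (intIdxs s.toList 'P') 0 0 *
                    (PySem.List.pyGetD (intIdxs s.toList 'T') 0 0 -
                     PySem.List.pyGetD (intIdxs s.toList 'P') 0 0 - 1)
                  = (s.toList.length : Int) - PySem.List.pyGetD (intIdxs s.toList 'T') 0 0 - 1) then "NO"
       else "YES") := by
  have hst : (PySem.List.pyRange 0 (PySem.Str.len s) 1).foldl
      (fun (acc : List Int × List Int × List Int) i =>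
        ( if PySem.List.pyGetD s.toList i ' ' = 'P' then acc.1 ++ [i] else acc.1
        , if PySem.List.pyGetD s.toList i ' ' = 'A' then acc.2.1 ++ [i] else acc.2.1
        , if PySem.List.pyGetD s.toList i ' ' = 'T' then acc.2.2 ++ [i] else acc.2.2 ))
      ([], [], [])
      = (intIdxs s.toList 'P', intIdxs s.toList 'A', intIdxs s.toList 'T') := by
    rw [PySem.Str.len_eq, PySem.List.pyRange_zero_natCast, List.foldl_map]
    simp only [PySem.List.pyGetD_natCast]
    rw [PySem.List.foldl_prod_mk
      (f := fun (acc : List Int) (k : Nat) => if s.toList.getD k ' ' = 'P' then acc ++ [(k : Int)] else acc)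
      (g := fun (acc : List Int × List Int) (k : Nat) =>
        ( if s.toList.getD k ' ' = 'A' then acc.1 ++ [(k : Int)] else acc.1
        , if s.toList.getD k ' ' = 'T' then acc.2 ++ [(k : Int)] else acc.2 ))]
    · rw [PySem.List.foldl_prod_mk
        (f := fun (acc : List Int) (k : Nat) => if s.toList.getD k ' ' = 'A' then acc ++ [(k : Int)] else acc)
        (g := fun (acc : List Int) (k : Nat) => if s.toList.getD k ' ' = 'T' then acc ++ [(k : Int)] else acc)]
      rw [PySem.List.foldl_append_ite (p := fun k => s.toList.getD k ' ' = 'P') (f := fun k => (k : Int)),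
          PySem.List.foldl_append_ite (p := fun k => s.toList.getD k ' ' = 'A') (f := fun k => (k : Int)),
          PySem.List.foldl_append_ite (p := fun k => s.toList.getD k ' ' = 'T') (f := fun k => (k : Int))]
      simp only [List.nil_append]
      simp [intIdxs, idxs, ← List.map_eq_flatMap]
  unfold YES_or_NO
  simp only [hst]

lemma pyPartitionChar_cases (cs : List Char) (c : Char) :
    (∃ l r, pyPartitionChar cs c = (l, true, r) ∧ cs = l ++ c :: r ∧ c ∉ l) ∨
    (pyPartitionChar cs c = (cs, false, []) ∧ c ∉ cs) := by
  induction cs with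
  | nil => right; exact ⟨rfl, by simp⟩
  | cons x xs ih =>
    by_cases hx : x = c
    · left
      exact ⟨[], xs, by simp [pyPartitionChar, hx], by simp [hx], by simp⟩
    · rcases ih with ⟨l, r, heq, hdec, hnm⟩ | ⟨heq, hnm⟩
      · left
        refine ⟨x :: l, r, ?_, by simp [hdec], ?_⟩
        · simp [pyPartitionChar, hx, heq]
        · simp only [List.mem_cons, not_or]
          exact ⟨fun h => hx h.symm, hnm⟩
      · right
        constructor
        · simp [pyPartitionChar, hx, heq]
        · simp only [List.mem_cons, not_or]
          exact ⟨fun h => hx h.symm, hnm⟩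

lemma mem_split_first {c : Char} {l : List Char} (h : c ∈ l) :
    ∃ u v, l = u ++ c :: v ∧ c ∉ u := by
  induction l with
  | nil => cases h
  | cons x xs ih =>
    rcases eq_or_ne x c with rfl | hx
    · exact ⟨[], xs, rfl, by simp⟩
    · rcases ih (by rcases List.mem_cons.mp h with h' | h'; exact absurd h'.symm hx; exact h') with
        ⟨u, v, rfl, hu⟩
      refine ⟨x :: u, v, rfl, ?_⟩
      simp only [List.mem_cons, not_or]
      exact ⟨fun h' => hx h'.symm, hu⟩

lemma length_intIdxs (l : List Char) (c : Char) : (intIdxs l c).length = l.count c := by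
  simp [intIdxs, length_idxs]

lemma idxs_eq_nil_of_not_mem {l : List Char} {c : Char} (h : c ∉ l) : idxs l c = [] := by
  have hlen := length_idxs l c
  rw [List.count_eq_zero_of_not_mem h] at hlen
  exact List.eq_nil_of_length_eq_zero hlen

lemma idxs_first (u v : List Char) (c : Char) (hu : c ∉ u) :
    ∃ w, idxs (u ++ c :: v) c = u.length :: w := by
  rw [idxs_append, idxs_eq_nil_of_not_mem hu, idxs_cons]
  simp

lemma intIdxs_first {u v : List Char} {c : Char} (hu : c ∉ u)
    (hcount : (u ++ c :: v).count c = 1) :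
    intIdxs (u ++ c :: v) c = [(u.length : Int)] := by
  obtain ⟨w, hw⟩ := idxs_first u v c hu
  have hlen : (idxs (u ++ c :: v) c).length = 1 := by rw [length_idxs]; exact hcount
  rw [hw] at hlen
  simp only [List.length_cons] at hlen
  have hw0 : w = [] := List.eq_nil_of_length_eq_zero (by omega)
  simp [intIdxs, hw, hw0]

lemma count_allA_zero {seg : List Char} (h : ∀ x ∈ seg, x = 'A') (c : Char) (hc : c ≠ 'A') :
    seg.count c = 0 :=
  List.count_eq_zero_of_not_mem (fun hm => hc (h c hm))

lemma count_allA_len {seg : List Char} (h : ∀ x ∈ seg, x = 'A') :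
    seg.count 'A' = seg.length :=
  List.count_eq_length.mpr (fun b hb => (h b hb).symm)

lemma main_eq (s : String) : YES_or_NO s = YES_or_NO_alt s := by
  rw [YES_or_NO_eq]
  rcases pyPartitionChar_cases s.toList 'P' with ⟨left, rest, hp, hdec, hPl⟩ | ⟨hp, hP⟩
  case inr =>
    -- no 'P' at all: both NO
    obtain ⟨⟨mid, tt, right⟩⟩ : Nonempty (List Char × Bool × List Char) := ⟨([], false, [])⟩
    have hcnt : s.toList.count 'P' = 0 := List.count_eq_zero_of_not_mem hP
    have h1 : ¬ ((intIdxs s.toList 'P').length = 1 ∧ (intIdxs s.toList 'T').length = 1 ∧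
        (intIdxs s.toList 'A').length + 2 = s.toList.length) := by
      rw [length_intIdxs, hcnt]
      rintro ⟨h, -⟩
      omega
    rw [if_pos h1]
    rcases e2 : pyPartitionChar s.toList 'T' with ⟨mid2, t2, right2⟩
    simp [YES_or_NO_alt, hp, e2]
  case inl =>
  rcases pyPartitionChar_cases rest 'T' with ⟨mid, right, ht, hdec2, hTm⟩ | ⟨ht, hT⟩
  case inr =>
    -- 'P' found, no 'T' in rest: both NO
    have hBalt : YES_or_NO_alt s = "NO" := by
      simp [YES_or_NO_alt, hp, ht]
    rw [hBalt]
    by_cases hC1 : (intIdxs s.toList 'P').length = 1 ∧ (intIdxs s.toList 'T').length = 1 ∧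
        (intIdxs s.toList 'A').length + 2 = s.toList.length
    · have cntP : s.toList.count 'P' = 1 := by rw [← length_intIdxs]; exact hC1.1
      have cntT : s.toList.count 'T' = 1 := by rw [← length_intIdxs]; exact hC1.2.1
      have hTmem : 'T' ∈ s.toList := List.count_pos_iff.mp (by omega)
      have hTleft : 'T' ∈ left := by
        rw [hdec] at hTmem
        rcases List.mem_append.mp hTmem with h' | h'
        · exact h'
        · rcases List.mem_cons.mp h' with h'' | h''
          · exact absurd h'' (by decide)
          · exact absurd h'' hT
      obtain ⟨u, v, hleft, hu⟩ := mem_split_first hTleft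
      have hPfirst : intIdxs s.toList 'P' = [(left.length : Int)] := by
        have := intIdxs_first (u := left) (v := rest) hPl (by rw [← hdec]; exact cntP)
        rw [← hdec] at this
        exact this
      have hshape : s.toList = u ++ 'T' :: (v ++ 'P' :: rest) := by
        rw [hdec, hleft]; simp
      have hTfirst : intIdxs s.toList 'T' = [(u.length : Int)] := by
        have := intIdxs_first (u := u) (v := v ++ 'P' :: rest) hu (by rw [← hshape]; exact cntT)
        rw [← hshape] at this
        exact this
      have hlen : u.length < left.length := by rw [hleft]; simp
      rw [if_neg (not_not_intro hC1), if_pos]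
      rw [hPfirst, hTfirst]
      simp only [PySem.List.pyGetD_zero, List.getD_cons_zero]
      intro habs
      have : (left.length : Int) + 1 < (u.length : Int) := habs
      omega
    · rw [if_pos hC1]
  case inl =>
  -- both found: l = left ++ 'P' :: mid ++ 'T' :: right
  have hl : s.toList = left ++ 'P' :: (mid ++ 'T' :: right) := by rw [hdec, hdec2]
  have hl2 : s.toList = (left ++ 'P' :: mid) ++ 'T' :: right := by rw [hl]; simp
  have hn : s.toList.length = left.length + mid.length + right.length + 2 := by
    rw [hl]; simp; omega
  by_cases hall : ∀ x ∈ left ++ mid ++ right, x = 'A'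
  · have hleftA : ∀ x ∈ left, x = 'A' := fun x hx => hall x (by simp [hx])
    have hmidA : ∀ x ∈ mid, x = 'A' := fun x hx => hall x (by simp [hx])
    have hrightA : ∀ x ∈ right, x = 'A' := fun x hx => hall x (by simp [hx])
    have cntP : s.toList.count 'P' = 1 := by
      rw [hl]
      simp [List.count_append, List.count_cons, count_allA_zero hleftA 'P' (by decide),
        count_allA_zero hmidA 'P' (by decide), count_allA_zero hrightA 'P' (by decide)]
    have cntT : s.toList.count 'T' = 1 := by
      rw [hl]
      simp [List.count_append, List.count_cons, count_allA_zero hleftA 'T' (by decide),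
        count_allA_zero hmidA 'T' (by decide), count_allA_zero hrightA 'T' (by decide)]
    have cntA : s.toList.count 'A' = left.length + mid.length + right.length := by
      rw [hl]
      simp [List.count_append, List.count_cons, count_allA_len hleftA,
        count_allA_len hmidA, count_allA_len hrightA]
      omega
    have hC1 : (intIdxs s.toList 'P').length = 1 ∧ (intIdxs s.toList 'T').length = 1 ∧
        (intIdxs s.toList 'A').length + 2 = s.toList.length := by
      rw [length_intIdxs, length_intIdxs, length_intIdxs, cntP, cntT, cntA, hn]
      omega
    have hPfirst : intIdxs s.toList 'P' = [(left.length : Int)] := by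
      have := intIdxs_first (u := left) (v := mid ++ 'T' :: right) hPl (by rw [← hl]; exact cntP)
      rw [← hl] at this
      exact this
    have hTnotmem : 'T' ∉ left ++ 'P' :: mid := by
      simp only [List.mem_append, List.mem_cons, not_or]
      exact ⟨fun h => by have := hleftA _ h; exact absurd this (by decide),
             by decide, hTm⟩
    have hTfirst : intIdxs s.toList 'T' = [(((left ++ 'P' :: mid).length : Nat) : Int)] := by
      have := intIdxs_first (u := left ++ 'P' :: mid) (v := right) hTnotmem
        (by rw [← hl2]; exact cntT)
      rw [← hl2] at this
      exact this
    have hBalt : YES_or_NO_alt s =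
        if mid ≠ [] ∧ left.length * mid.length = right.length then "YES" else "NO" := by
      simp only [YES_or_NO_alt, hp, ht]
      have h1 : ((left ++ mid ++ right).all (· == 'A')) = true := by
        simp only [List.all_eq_true, beq_iff_eq]
        exact hall
      by_cases hm : mid = [] <;> by_cases hk : left.length * mid.length = right.length <;>
        simp [hm, hk, h1] <;> exact ⟨hleftA, hmidA, hrightA⟩
    rw [hBalt, if_neg (not_not_intro hC1), hPfirst, hTfirst]
    simp only [PySem.List.pyGetD_zero, List.getD_cons_zero, List.length_append,
      List.length_cons]
    split_ifs with h1 h2 h3 h4 h5 <;> try rfl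
    · -- A computed YES but B's segment condition failed: impossible
      exfalso
      apply h3
      have hm : mid ≠ [] := by
        intro he
        rw [he] at h1
        simp at h1
      refine ⟨hm, ?_⟩
      rw [hn] at h2
      push_cast at h2
      have h2' : (left.length : Int) * mid.length = right.length := by
        ring_nf at h2 ⊢
        linarith
      exact_mod_cast h2'
    · -- A failed the arithmetic check but B's condition holds: impossible
      exfalso
      apply h2
      rw [hn]
      push_cast
      have hrk : (right.length : Int) = left.length * mid.length := by exact_mod_cast h4.2.symm
      rw [hrk]
      ring
    · -- A failed the adjacency check but B's condition holds: impossible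
      exfalso
      have hm := List.length_pos_iff.mpr h5.1
      push_cast at h1
      omega
  · -- some non-'A' char in the segments: both NO
    have hBalt : YES_or_NO_alt s = "NO" := by
      simp only [YES_or_NO_alt, hp, ht]
      simp only [List.all_eq_true, beq_iff_eq]
      simp
      intro _ ha
      exact fun _ => hall (fun x hx => ha x (by
        rcases List.mem_append.mp hx with h' | h'
        · rcases List.mem_append.mp h' with h'' | h''
          · exact Or.inl h''
          · exact Or.inr (Or.inl h'')
        · exact Or.inr (Or.inr h')))
    rw [hBalt, if_pos]
    intro hC1
    have cntP : s.toList.count 'P' = 1 := by rw [← length_intIdxs]; exact hC1.1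
    have cntT : s.toList.count 'T' = 1 := by rw [← length_intIdxs]; exact hC1.2.1
    have cntA : s.toList.count 'A' + 2 = s.toList.length := by
      rw [← length_intIdxs]; exact hC1.2.2
    have hPAT := all_PAT_of_count_eq (l := s.toList) (by omega)
    push_neg at hall
    obtain ⟨x, hx, hxA⟩ := hall
    have hxl : x ∈ s.toList := by
      rw [hl]
      rcases List.mem_append.mp hx with h' | h'
      · rcases List.mem_append.mp h' with h'' | h''
        · simp [h'']
        · simp [h'']
      · simp [h']
    rcases hPAT x hxl with rfl | rfl | rfl
    · -- a second 'P'
      have hx2 : 'P' ∈ mid ∨ 'P' ∈ right := by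
        rcases List.mem_append.mp hx with h' | h'
        · rcases List.mem_append.mp h' with h'' | h''
          · exact absurd h'' hPl
          · exact Or.inl h''
        · exact Or.inr h'
      have : 2 ≤ s.toList.count 'P' := by
        rw [hl]
        simp only [List.count_append, List.count_cons_self, List.count_cons]
        rcases hx2 with h' | h' <;>
          have := List.count_pos_iff.mpr h' <;> omega
      omega
    · exact hxA rfl
    · -- a second 'T'
      have hx2 : 'T' ∈ left ∨ 'T' ∈ right := by
        rcases List.mem_append.mp hx with h' | h'
        · rcases List.mem_append.mp h' with h'' | h''
          · exact Or.inl h''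
          · exact absurd h'' hTm
        · exact Or.inr h'
      have : 2 ≤ s.toList.count 'T' := by
        rw [hl2]
        simp only [List.count_append, List.count_cons_self, List.count_cons]
        rcases hx2 with h' | h' <;>
          have := List.count_pos_iff.mpr h' <;> omega
      omega

-- ===== VERDICT (by name: the statement is the Claim_ definition above) =====
theorem YES_or_NO_spec : Claim_equal_YES_or_NO := by
  intro word_str _
  unfold Spec_YES_or_NO
  exact main_eq word_str
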